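-- pv_equiv track=rewrite | github.com/ARealGoldknow/UtilityCanvas | tts_exporter.py | group_voice_variants
-- ===== SOURCE A (Python) =====
-- def group_voice_variants(full_voice_names: list[str]) -> dict[str, list[str]]:
--     """
--     Group voices by a "base name", splitting on the first " (".
--     Examples:
--       "Daniel" -> base="Daniel", variant="Default"
--       "Daniel (UK)" -> base="Daniel", variant="(UK)"
--       "Siri Voice 4" -> base="Siri Voice 4", variant="Default"
--       "Samantha (Enhanced)" -> base="Samantha", variant="(Enhanced)"
--     Note: macOS varies. We simply group by this pattern.
--     """
--     grouped: dict[str, list[str]] = {}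
--
--     for full in full_voice_names:
--         if " (" in full and full.endswith(")"):
--             base = full.split(" (", 1)[0]
--             suffix = full[len(base):]  # includes the leading space: " (UK)"
--             variant = suffix.strip()   # "(UK)"
--         else:
--             base = full
--             variant = "Default"
--
--         grouped.setdefault(base, []).append(variant)
--
--     # Sort variants: Default first, then alphabetically
--     for base, variants in grouped.items():
--         variants_unique = []
--         seen = set()
--         for v in variants:
--             if v not in seen:
--                 seen.add(v)
--                 variants_unique.append(v)
--
--         variants_unique.sort(key=lambda x: (0 if x == "Default" else 1, x.lower()))
--         grouped[base] = variants_unique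
--
--     return grouped
-- ===== SOURCE B (Python) =====
-- def group_voice_variants(full_voice_names: list[str]) -> dict[str, list[str]]:
--     def parse(full):
--         if full.endswith(")"):
--             i = full.find(" (")
--             if i != -1:
--                 return full[:i], full[i + 1:]
--         return full, "Default"
--
--     pairs = [parse(full) for full in full_voice_names]
--     # one global stable sort by the variant key; bases keep first-occurrence order
--     order = sorted(pairs, key=lambda p: (0 if p[1] == "Default" else 1, p[1].lower()))
--     grouped = {base: [] for base, _ in pairs}
--     for base, variant in order:
--         bucket = grouped[base]
--         if variant not in bucket:
--             bucket.append(variant)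
--     return grouped
-- ===== Notes on version B (the rewrite author's own statement) =====
-- stated objective: alternative
-- what changed: B parses each name once into a (base, variant) pair, performs ONE global stable sort of all pairs by the variant key, and then fills first-occurrence-ordered buckets in a single pass that skips duplicates, instead of A's collect-everything dict pass followed by a per-group seen-set dedup and a per-group in-place sort.
import Mathlib
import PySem

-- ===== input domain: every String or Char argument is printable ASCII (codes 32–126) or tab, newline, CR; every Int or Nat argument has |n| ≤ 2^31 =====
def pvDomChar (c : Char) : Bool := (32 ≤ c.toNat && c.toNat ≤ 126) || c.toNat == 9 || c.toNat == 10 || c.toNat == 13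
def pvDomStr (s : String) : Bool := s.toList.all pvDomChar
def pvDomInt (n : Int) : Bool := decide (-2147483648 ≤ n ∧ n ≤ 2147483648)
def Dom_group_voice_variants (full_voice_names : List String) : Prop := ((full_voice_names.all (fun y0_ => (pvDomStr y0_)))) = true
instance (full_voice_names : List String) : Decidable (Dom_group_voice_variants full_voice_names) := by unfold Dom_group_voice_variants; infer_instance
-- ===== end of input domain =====

-- B replaces A's collect-all / per-group seen-set dedup / per-group in-place sort by: parse once into
-- (base, variant) pairs, ONE global stable sort of the pairs by the variant key, then a single pass over
-- the sorted pairs appending each first occurrence into its (first-occurrence-ordered) bucket. Same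
-- return value; objective: alternative (same asymptotic cost).

-- variant sort key: (0 if x == "Default" else 1, x.lower())
def pvKey1 (v : String) : Int := if v == "Default" then 0 else 1
def pvKey2 (v : String) : String := PySem.Str.lower v

-- ===== PORT A =====
-- A's per-name parse: split(" (", 1)[0] / slice / strip. The separator " (" is nonempty, so
-- splitMax? is always `some`, and Python's split never returns an empty list, so [0] is its head.
def pvParseA (full : String) : String × String :=
  if PySem.Str.isIn " (" full && PySem.Str.endswith full ")" then
    let base := ((PySem.Str.splitMax? full " (" 1).getD []).headD ""
    let suffix := PySem.Str.slice full (some (PySem.Str.len base)) none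
    (base, PySem.Str.strip suffix)
  else (full, "Default")

def group_voice_variants (full_voice_names : List String) : List (String × List String) :=
  let grouped := full_voice_names.foldl (fun d full =>
    let bv := pvParseA full
    d.modify bv.1 [] (fun l => l ++ [bv.2])) PySem.Dict.empty
  let grouped2 := grouped.items.foldl (fun d p =>
    let us := p.2.foldl (fun (us : List String × PySem.Set String) v =>
        if PySem.Set.contains us.2 v then us else (us.1 ++ [v], PySem.Set.add us.2 v))
      ([], PySem.Set.empty)
    d.insert p.1 (PySem.List.sorted2 us.1 pvKey1 pvKey2)) grouped
  grouped2.items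

-- ===== PORT B =====
-- B's parse: endswith / find / two slices
def pvParse (full : String) : String × String :=
  if PySem.Str.endswith full ")" then
    let i := PySem.Str.find full " ("
    if i != -1 then
      (PySem.Str.slice full none (some i), PySem.Str.slice full (some (i + 1)) none)
    else (full, "Default")
  else (full, "Default")

-- `bucket = grouped[base]` never raises (every base was seeded), so `getD … []` reads the bucket exactly.
def group_voice_variants_alt (full_voice_names : List String) : List (String × List String) :=
  let pairs := full_voice_names.map pvParse
  let order := PySem.List.sorted2 pairs (fun p => pvKey1 p.2) (fun p => pvKey2 p.2)
  let grouped := pairs.foldl (fun d p => d.insert p.1 ([] : List String)) PySem.Dict.empty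
  let grouped2 := order.foldl (fun d p =>
    if (d.getD p.1 []).contains p.2 then d else d.modify p.1 [] (fun l => l ++ [p.2])) grouped
  grouped2.items

-- ===== PRECONDITION & SPEC =====
def Spec_group_voice_variants (full_voice_names : List String) (out : List (String × List String)) : Prop := out = group_voice_variants_alt full_voice_names
instance (full_voice_names : List String) (out : List (String × List String)) : Decidable (Spec_group_voice_variants full_voice_names out) := by unfold Spec_group_voice_variants; infer_instance

-- ===== CLAIM (what is proved, stated in full; the proofs are below) =====
def Claim_equal_group_voice_variants : Prop := ∀ (full_voice_names : List String), Dom_group_voice_variants full_voice_names → Spec_group_voice_variants full_voice_names (group_voice_variants full_voice_names)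

-- ===== LEMMAS AND PROOFS =====

lemma pvInsertBy_split {α κ : Type} [LinearOrder κ] (key : α → κ) (x : α) (S : List α)
    (h : S.Pairwise (fun a b => key a ≤ key b)) :
    PySem.List.insertBy (fun a b => decide (key a < key b)) x S =
      S.filter (fun y => !decide (key x < key y)) ++ x :: S.filter (fun y => decide (key x < key y)) := by
  induction S with
  | nil => simp [PySem.List.insertBy]
  | cons y t ih =>
    rcases List.pairwise_cons.mp h with ⟨hy, ht⟩
    by_cases hxy : key x < key y
    · have h1 : (y :: t).filter (fun y' => !decide (key x < key y')) = [] := by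
        apply List.filter_eq_nil_iff.mpr
        intro z hz
        have : key x < key z := by
          rcases hz with _ | hz
          · exact hxy
          · exact lt_of_lt_of_le hxy (hy z (by assumption))
        simp [this]
      have h2 : (y :: t).filter (fun y' => decide (key x < key y')) = y :: t := by
        apply List.filter_eq_self.mpr
        intro z hz
        have : key x < key z := by
          rcases hz with _ | hz
          · exact hxy
          · exact lt_of_lt_of_le hxy (hy z (by assumption))
        simp [this]
      simp [PySem.List.insertBy, hxy, h1, h2]
    · rw [List.filter_cons, List.filter_cons]
      simp only [hxy, decide_false, Bool.not_false, if_true, decide_eq_true_eq, if_false]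
      simp [PySem.List.insertBy, hxy, ih ht]

lemma pvPairwise_split {α κ : Type} [LinearOrder κ] (key : α → κ) (x : α) (S : List α)
    (h : S.Pairwise (fun a b => key a ≤ key b)) :
    S = S.filter (fun y => !decide (key x < key y)) ++ S.filter (fun y => decide (key x < key y)) := by
  induction S with
  | nil => simp
  | cons y t ih =>
    rcases List.pairwise_cons.mp h with ⟨hy, ht⟩
    by_cases hxy : key x < key y
    · have h1 : (y :: t).filter (fun y' => !decide (key x < key y')) = [] := by
        apply List.filter_eq_nil_iff.mpr
        intro z hz
        have : key x < key z := by
          rcases hz with _ | hz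
          · exact hxy
          · exact lt_of_lt_of_le hxy (hy z (by assumption))
        simp [this]
      have h2 : (y :: t).filter (fun y' => decide (key x < key y')) = y :: t := by
        apply List.filter_eq_self.mpr
        intro z hz
        have : key x < key z := by
          rcases hz with _ | hz
          · exact hxy
          · exact lt_of_lt_of_le hxy (hy z (by assumption))
        simp [this]
      rw [h1, h2]; rfl
    · rw [List.filter_cons, List.filter_cons]
      simp only [hxy, decide_false, Bool.not_false, if_true, decide_eq_true_eq, if_false]
      exact congrArg (y :: ·) (ih ht)

lemma pvSorted_append_singleton {α κ : Type} [LinearOrder κ] (key : α → κ) (xs : List α) (x : α) :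
    PySem.List.sorted (xs ++ [x]) key false =
      PySem.List.insertBy (fun a b => decide (key a < key b)) x (PySem.List.sorted xs key false) := by
  rw [PySem.List.sorted_eq_foldl_insertBy, PySem.List.sorted_eq_foldl_insertBy, List.foldl_append]
  rfl

lemma pvSorted_filter {α κ : Type} [LinearOrder κ] (key : α → κ) (p : α → Bool) (xs : List α) :
    (PySem.List.sorted xs key false).filter p = PySem.List.sorted (xs.filter p) key false := by
  induction xs using List.reverseRecOn with
  | nil => simp [PySem.List.sorted]
  | append_singleton xs x ih =>
    rw [pvSorted_append_singleton, pvInsertBy_split key x _ (PySem.List.sorted_pairwise xs key),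
      List.filter_append, List.filter_cons]
    by_cases hpx : p x = true
    · have hfx : List.filter p [x] = [x] := by simp [hpx]
      rw [List.filter_append, hfx, pvSorted_append_singleton,
        pvInsertBy_split key x _ (PySem.List.sorted_pairwise _ key), ← ih]
      simp [hpx, List.filter_filter, Bool.and_comm]
    · have hpx' : p x = false := by simpa using hpx
      have hfx : List.filter p [x] = [] := by simp [hpx']
      rw [List.filter_append, hfx, List.append_nil, ← ih]
      have hpw : ((PySem.List.sorted xs key false).filter p).Pairwise (fun a b => key a ≤ key b) :=
        List.Pairwise.sublist (List.filter_sublist) (PySem.List.sorted_pairwise xs key)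
      simp only [hpx', Bool.false_eq_true, if_false]
      rw [List.filter_comm, List.filter_comm p]
      exact (pvPairwise_split key x _ hpw).symm

lemma pvSorted_map {α β κ : Type} [LinearOrder κ] (key : β → κ) (f : α → β) (xs : List α) :
    (PySem.List.sorted xs (fun a => key (f a)) false).map f = PySem.List.sorted (xs.map f) key false := by
  induction xs using List.reverseRecOn with
  | nil => simp [PySem.List.sorted]
  | append_singleton xs x ih =>
    rw [pvSorted_append_singleton, pvInsertBy_split (fun a => key (f a)) x _ (PySem.List.sorted_pairwise xs _),
      List.map_append, List.map_cons]
    simp only [List.map_append, List.map_cons, List.map_nil]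
    rw [pvSorted_append_singleton,
      pvInsertBy_split key (f x) _ (PySem.List.sorted_pairwise _ key), ← ih]
    simp [List.filter_map, Function.comp_def]

lemma pvOfList_append {α : Type} [BEq α] (u v : List α) :
    PySem.Set.ofList (u ++ v) = PySem.Set.update (PySem.Set.ofList u) v := by
  simp [PySem.Set.ofList, PySem.Set.update, List.foldl_append]

lemma pvAdd_of_mem {α : Type} [BEq α] [LawfulBEq α] {s : PySem.Set α} {x : α} (h : x ∈ s) :
    PySem.Set.add s x = s := by
  unfold PySem.Set.add
  rw [if_pos ((PySem.Set.contains_iff s x).mpr h)]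

lemma pvAdd_of_not_mem {α : Type} [BEq α] [LawfulBEq α] {s : PySem.Set α} {x : α} (h : x ∉ s) :
    PySem.Set.add s x = s ++ [x] := by
  unfold PySem.Set.add
  rw [if_neg (fun hc => h ((PySem.Set.contains_iff s x).mp hc))]

lemma pvUpdate_append_left {α : Type} [BEq α] [LawfulBEq α] (v : List α) :
    ∀ (s t : List α), (∀ y ∈ v, y ∉ s) →
    PySem.Set.update (s ++ t) v = s ++ PySem.Set.update t v := by
  induction v with
  | nil => intro s t _; rfl
  | cons y v ih =>
    intro s t h
    have hys : y ∉ s := h y (by simp)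
    have hadd : PySem.Set.add (s ++ t) y = s ++ PySem.Set.add t y := by
      by_cases hm : y ∈ t
      · rw [pvAdd_of_mem (by simp [hm]), pvAdd_of_mem hm]
      · rw [pvAdd_of_not_mem (by simp [hm, hys]), pvAdd_of_not_mem hm, List.append_assoc]
    show PySem.Set.update (PySem.Set.add (s ++ t) y) v = s ++ PySem.Set.update (PySem.Set.add t y) v
    rw [hadd]
    exact ih s _ (fun z hz => h z (by simp [hz]))

lemma pvOfList_append_disjoint {α : Type} [BEq α] [LawfulBEq α] (u v : List α)
    (h : ∀ y ∈ v, y ∉ u) :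
    PySem.Set.ofList (u ++ v) = PySem.Set.ofList u ++ PySem.Set.ofList v := by
  rw [pvOfList_append]
  have h' : ∀ y ∈ v, y ∉ PySem.Set.ofList u := fun y hy hm =>
    h y hy ((PySem.Set.mem_ofList u y).mp hm)
  have := pvUpdate_append_left v (PySem.Set.ofList u) [] h'
  simpa using this

lemma pvUpdate_eq_self {α : Type} [BEq α] [LawfulBEq α] (l : List α) :
    ∀ (s : PySem.Set α), (∀ y ∈ l, y ∈ s) → PySem.Set.update s l = s := by
  induction l with
  | nil => intro s _; rfl
  | cons y t ih =>
    intro s h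
    show PySem.Set.update (PySem.Set.add s y) t = s
    rw [pvAdd_of_mem (h y (by simp))]
    exact ih s (fun z hz => h z (by simp [hz]))

lemma pvOfList_filter {α : Type} [BEq α] [LawfulBEq α] (p : α → Bool) (l : List α) :
    PySem.Set.ofList (l.filter p) = (PySem.Set.ofList l).filter p := by
  induction l using List.reverseRecOn with
  | nil => rfl
  | append_singleton l x ih =>
    have hupd : ∀ (s : PySem.Set α) (z : α), PySem.Set.update s [z] = PySem.Set.add s z := fun _ _ => rfl
    rw [List.filter_append, pvOfList_append, pvOfList_append, hupd]
    rcases hpx : p x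
    · simp only [List.filter_cons, hpx, List.filter_nil]
      show PySem.Set.ofList (l.filter p) = ((PySem.Set.ofList l).add x).filter p
      by_cases hm : x ∈ PySem.Set.ofList l
      · rw [pvAdd_of_mem hm, ih]
      · rw [pvAdd_of_not_mem hm, List.filter_append, ih]
        simp [hpx]
    · simp only [List.filter_cons, hpx, List.filter_nil, hupd]
      show PySem.Set.add (PySem.Set.ofList (l.filter p)) x = ((PySem.Set.ofList l).add x).filter p
      by_cases hm : x ∈ PySem.Set.ofList l
      · have hm' : x ∈ PySem.Set.ofList (l.filter p) := by
          rw [PySem.Set.mem_ofList] at hm ⊢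
          exact List.mem_filter.mpr ⟨hm, hpx⟩
        rw [pvAdd_of_mem hm, pvAdd_of_mem hm', ih]
      · have hm' : x ∉ PySem.Set.ofList (l.filter p) := by
          rw [PySem.Set.mem_ofList] at hm ⊢
          exact fun hc => hm (List.mem_of_mem_filter hc)
        rw [pvAdd_of_not_mem hm, pvAdd_of_not_mem hm', List.filter_append, ih]
        simp [hpx]

lemma pvOfList_sorted {α κ : Type} [BEq α] [LawfulBEq α] [LinearOrder κ] (key : α → κ) (xs : List α) :
    PySem.Set.ofList (PySem.List.sorted xs key false) =
      PySem.List.sorted (PySem.Set.ofList xs) key false := by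
  induction xs using List.reverseRecOn with
  | nil => rfl
  | append_singleton xs x ih =>
    have hS := PySem.List.sorted_pairwise xs key
    have hofl : PySem.Set.ofList (xs ++ [x]) = PySem.Set.add (PySem.Set.ofList xs) x := by
      rw [pvOfList_append]; rfl
    rw [pvSorted_append_singleton, pvInsertBy_split key x _ hS, hofl]
    by_cases hm : x ∈ xs
    · have hmS : x ∈ PySem.List.sorted xs key false := (PySem.List.mem_sorted xs key false x).mpr hm
      have hmA : x ∈ (PySem.List.sorted xs key false).filter (fun y => !decide (key x < key y)) :=
        List.mem_filter.mpr ⟨hmS, by simp⟩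
      rw [pvOfList_append]
      show PySem.Set.update (PySem.Set.update _ [x]) _ = _
      have hupd1 : PySem.Set.update (PySem.Set.ofList ((PySem.List.sorted xs key false).filter
          (fun y => !decide (key x < key y)))) [x]
          = PySem.Set.ofList ((PySem.List.sorted xs key false).filter (fun y => !decide (key x < key y))) := by
        show PySem.Set.add _ _ = _
        exact pvAdd_of_mem ((PySem.Set.mem_ofList _ _).mpr hmA)
      rw [hupd1, ← pvOfList_append, ← pvPairwise_split key x _ hS, ih,
        pvAdd_of_mem ((PySem.Set.mem_ofList _ _).mpr hm)]
    · have hmS : x ∉ PySem.List.sorted xs key false :=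
        fun hc => hm ((PySem.List.mem_sorted xs key false x).mp hc)
      have hdisj : ∀ y ∈ x :: (PySem.List.sorted xs key false).filter (fun y => decide (key x < key y)),
          y ∉ (PySem.List.sorted xs key false).filter (fun y => !decide (key x < key y)) := by
        intro y hy hyA
        rcases List.mem_cons.mp hy with rfl | hyB
        · exact hmS (List.mem_of_mem_filter hyA)
        · have h1 := (List.mem_filter.mp hyA).2
          have h2 := (List.mem_filter.mp hyB).2
          simp at h1 h2
          exact absurd h2 (not_lt.mpr (le_of_not_gt (by simpa using h1)))
      have hdisjB : ∀ y ∈ (PySem.List.sorted xs key false).filter (fun y => decide (key x < key y)),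
          y ∉ [x] := by
        intro y hyB hc
        rcases List.mem_singleton.mp hc with rfl
        exact hmS (List.mem_of_mem_filter hyB)
      rw [pvOfList_append_disjoint _ _ hdisj]
      have : PySem.Set.ofList (x :: (PySem.List.sorted xs key false).filter (fun y => decide (key x < key y)))
          = x :: PySem.Set.ofList ((PySem.List.sorted xs key false).filter (fun y => decide (key x < key y))) := by
        have := pvOfList_append_disjoint [x]
          ((PySem.List.sorted xs key false).filter (fun y => decide (key x < key y))) hdisjB
        simpa using this
      rw [this, pvOfList_filter, pvOfList_filter, ih,
        pvAdd_of_not_mem (fun hc => hm ((PySem.Set.mem_ofList _ _).mp hc)),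
        pvSorted_append_singleton,
        pvInsertBy_split key x _ (PySem.List.sorted_pairwise _ key)]

lemma pvSorted2_eq {α κ₁ κ₂ : Type} [LinearOrder κ₁] [LinearOrder κ₂]
    (xs : List α) (k1 : α → κ₁) (k2 : α → κ₂) :
    PySem.List.sorted2 xs k1 k2 false = PySem.List.sorted xs (fun x => toLex (k1 x, k2 x)) false := by
  rw [PySem.List.sorted_eq_foldl_insertBy]
  show List.foldl (fun acc x => PySem.List.insertBy _ x acc) [] xs = _
  have hb : (fun a b => decide (k1 a < k1 b) || (!decide (k1 b < k1 a) && decide (k2 a < k2 b)))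
      = (fun a b : α => decide (toLex (k1 a, k2 a) < toLex (k1 b, k2 b))) := by
    funext a b
    rcases lt_trichotomy (k1 a) (k1 b) with h | h | h
    · simp [h, Prod.Lex.toLex_lt_toLex]
    · simp [h, Prod.Lex.toLex_lt_toLex]
    · simp [h, not_lt.mpr (le_of_lt h), Prod.Lex.toLex_lt_toLex, ne_of_gt h]
  show List.foldl (fun acc x => PySem.List.insertBy
      (fun a b => decide (k1 a < k1 b) || (!decide (k1 b < k1 a) && decide (k2 a < k2 b))) x acc) [] xs = _
  rw [hb]

lemma pvGetD_seed_fold (l : List (String × String)) :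
    ∀ (d : PySem.Dict String (List String)) (b : String), d.getD b [] = [] →
    (l.foldl (fun d p => d.insert p.1 ([] : List String)) d).getD b [] = [] := by
  induction l with
  | nil => intro d b h; exact h
  | cons q t ih =>
    intro d b h
    refine ih _ b ?_
    rw [PySem.Dict.getD_insert]
    split <;> simp [h]

lemma pvGetD_dedup_fold (l : List (String × String)) :
    ∀ (d : PySem.Dict String (List String)) (b : String),
    (l.foldl (fun d p =>
        if (d.getD p.1 []).contains p.2 then d else d.modify p.1 [] (fun vs => vs ++ [p.2])) d).getD b []
      = PySem.Set.update (d.getD b []) ((l.filter (fun p => p.1 == b)).map (fun p => p.2)) := by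
  induction l with
  | nil => intro d b; rfl
  | cons q t ih =>
    intro d b
    rw [List.foldl_cons, List.filter_cons]
    by_cases hqb : q.1 = b
    · subst hqb
      rw [if_pos (show (q.1 == q.1) = true by simp), List.map_cons]
      by_cases hc : (d.getD q.1 []).contains q.2
      · rw [if_pos hc, ih]
        have hadd : PySem.Set.add (d.getD q.1 []) q.2 = d.getD q.1 [] :=
          pvAdd_of_mem ((List.contains_iff_mem).mp hc)
        have hstep : PySem.Set.update (d.getD q.1 [])
            (q.2 :: List.map (fun p => p.2) (List.filter (fun p => p.1 == q.1) t))
            = PySem.Set.update (d.getD q.1 [])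
              (List.map (fun p => p.2) (List.filter (fun p => p.1 == q.1) t)) := by
          show PySem.Set.update (PySem.Set.add (d.getD q.1 []) q.2) _ = _
          rw [hadd]
        rw [hstep]
      · rw [if_neg hc, ih,
          PySem.Dict.getD_modify_self d q.1 [] (fun vs => vs ++ [q.2])]
        have hadd : PySem.Set.add (d.getD q.1 []) q.2 = d.getD q.1 [] ++ [q.2] :=
          pvAdd_of_not_mem (fun hm => hc (List.contains_iff_mem.mpr hm))
        have hstep : PySem.Set.update (d.getD q.1 [])
            (q.2 :: List.map (fun p => p.2) (List.filter (fun p => p.1 == q.1) t))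
            = PySem.Set.update (d.getD q.1 [] ++ [q.2])
              (List.map (fun p => p.2) (List.filter (fun p => p.1 == q.1) t)) := by
          show PySem.Set.update (PySem.Set.add (d.getD q.1 []) q.2) _ = _
          rw [hadd]
        rw [hstep]
    · have hbq : (q.1 == b) = false := by simp [hqb]
      rw [hbq]
      simp only [Bool.false_eq_true, if_false]
      by_cases hc : (d.getD q.1 []).contains q.2
      · rw [if_pos hc, ih]
      · rw [if_neg hc, ih, PySem.Dict.getD_modify_of_ne d [] _ (fun h => hqb h.symm)]

lemma pvKeys_dedup_fold (l : List (String × String)) :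
    ∀ (d : PySem.Dict String (List String)), (∀ p ∈ l, d.contains p.1 = true) →
    (l.foldl (fun d p =>
        if (d.getD p.1 []).contains p.2 then d else d.modify p.1 [] (fun vs => vs ++ [p.2])) d).keys
      = d.keys := by
  induction l with
  | nil => intro d _; rfl
  | cons q t ih =>
    intro d h
    rw [List.foldl_cons]
    by_cases hc : (d.getD q.1 []).contains q.2
    · rw [if_pos hc, ih _ (fun p hp => h p (by simp [hp]))]
    · rw [if_neg hc]
      have hkeys : (d.modify q.1 [] (fun vs => vs ++ [q.2])).keys = d.keys := by
        rw [PySem.Dict.keys_modify, PySem.Dict.keys_insert_of_contains d _ (h q (by simp))]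
      rw [ih, hkeys]
      intro p hp
      have h2 := h p (by simp [hp])
      rw [PySem.Dict.contains_iff_mem_keys] at h2 ⊢
      rw [hkeys]
      exact h2

lemma pvGetD_insert_fold_of_not_mem (f : String × List String → List String)
    (l : List (String × List String)) :
    ∀ (d : PySem.Dict String (List String)) (b : String), b ∉ l.map Prod.fst →
    (l.foldl (fun d q => d.insert q.1 (f q)) d).getD b [] = d.getD b [] := by
  induction l with
  | nil => intro d b _; rfl
  | cons q t ih =>
    intro d b hb
    rw [List.foldl_cons, ih _ b (fun hc => hb (by simp [hc]))]
    rw [PySem.Dict.getD_insert, if_neg (fun hc => hb (by simp [hc]))]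

lemma pvGetD_insert_fold (f : String × List String → List String) (l : List (String × List String)) :
    ∀ (d : PySem.Dict String (List String)) (p : String × List String),
    p ∈ l → (l.map Prod.fst).Nodup →
    (l.foldl (fun d q => d.insert q.1 (f q)) d).getD p.1 [] = f p := by
  induction l with
  | nil => intro d p hp _; cases hp
  | cons q t ih =>
    intro d p hp hnd
    rw [List.map_cons, List.nodup_cons] at hnd
    rw [List.foldl_cons]
    rcases List.mem_cons.mp hp with rfl | hpt
    · rw [pvGetD_insert_fold_of_not_mem f t _ p.1 hnd.1, PySem.Dict.getD_insert, if_pos rfl]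
    · exact ih _ p hpt hnd.2

lemma pvDedup_pair_fold (vs : List String) :
    ∀ s : List String,
    vs.foldl (fun (us : List String × PySem.Set String) v =>
        if PySem.Set.contains us.2 v then us else (us.1 ++ [v], PySem.Set.add us.2 v)) (s, s)
      = (PySem.Set.update s vs, PySem.Set.update s vs) := by
  induction vs with
  | nil => intro s; rfl
  | cons v t ih =>
    intro s
    rw [List.foldl_cons]
    by_cases hm : v ∈ s
    · rw [if_pos ((PySem.Set.contains_iff s v).mpr hm)]
      have hupd : PySem.Set.update s (v :: t) = PySem.Set.update s t := by
        show PySem.Set.update (PySem.Set.add s v) t = _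
        rw [pvAdd_of_mem hm]
      rw [hupd]
      exact ih s
    · rw [if_neg (fun hc => hm ((PySem.Set.contains_iff s v).mp hc))]
      have hupd : PySem.Set.update s (v :: t) = PySem.Set.update (s ++ [v]) t := by
        show PySem.Set.update (PySem.Set.add s v) t = _
        rw [pvAdd_of_not_mem hm]
      have hseed : ((s, s).1 ++ [v], PySem.Set.add (s, s).2 v) = (s ++ [v], s ++ [v]) := by
        simp [pvAdd_of_not_mem hm]
      rw [hupd, hseed]
      exact ih (s ++ [v])

lemma pvSep_toList : " (".toList = [' ', '('] := by decide

lemma pvFindGo_nonneg (l : List Char) : ∀ k : Nat,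
    PySem.Chars.find.go [' ', '('] l k = -1 ∨ 0 ≤ PySem.Chars.find.go [' ', '('] l k := by
  induction l with
  | nil => intro k; left; simp [PySem.Chars.find.go]
  | cons c rest ih =>
    intro k
    rw [PySem.Chars.find.go]
    by_cases hp : List.isPrefixOf [' ', '('] (c :: rest)
    · right; simp [hp]
    · simp only [hp, Bool.false_eq_true, if_false]
      exact ih (k + 1)

lemma pvFindGo_shift (l : List Char) : ∀ k : Nat,
    PySem.Chars.find.go [' ', '('] l k =
      if PySem.Chars.find.go [' ', '('] l 0 = -1 then -1
      else PySem.Chars.find.go [' ', '('] l 0 + k := by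
  induction l with
  | nil => intro k; simp [PySem.Chars.find.go]
  | cons c rest ih =>
    intro k
    rw [PySem.Chars.find.go]
    conv_rhs => rw [PySem.Chars.find.go]
    by_cases hp : List.isPrefixOf [' ', '('] (c :: rest)
    · simp [hp]
    · simp only [hp, Bool.false_eq_true, if_false]
      rw [ih (k + 1), ih 1]
      rcases pvFindGo_nonneg rest 0 with h0 | h0
      · simp [h0]
      · have hne : PySem.Chars.find.go [' ', '('] rest 0 ≠ -1 := by omega
        have hne1 : PySem.Chars.find.go [' ', '('] rest 0 + 1 ≠ -1 := by omega
        rw [if_neg hne, if_neg hne]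
        push_cast
        rw [if_neg hne1]
        ring

lemma pvFind_cons (c : Char) (rest : List Char) :
    PySem.Chars.find (c :: rest) [' ', '('] =
      if List.isPrefixOf [' ', '('] (c :: rest) then 0
      else (if PySem.Chars.find rest [' ', '('] = -1 then -1
            else PySem.Chars.find rest [' ', '('] + 1) := by
  show PySem.Chars.find.go _ _ 0 = _
  rw [PySem.Chars.find.go]
  by_cases hp : List.isPrefixOf [' ', '('] (c :: rest)
  · simp [hp]
  · simp only [hp, Bool.false_eq_true, if_false]
    exact pvFindGo_shift rest 1

lemma pvFind_spec (cs : List Char) (h : PySem.Chars.find cs [' ', '('] ≠ -1) :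
    ∃ n : Nat, PySem.Chars.find cs [' ', '('] = (n : Int) ∧
      List.drop n cs = ' ' :: '(' :: List.drop (n + 2) cs := by
  induction cs with
  | nil => exact absurd (by simp [PySem.Chars.find, PySem.Chars.find.go]) h
  | cons c rest ih =>
    rw [pvFind_cons] at h ⊢
    by_cases hp : List.isPrefixOf [' ', '('] (c :: rest)
    · refine ⟨0, by simp [hp], ?_⟩
      have hpre : [' ', '('] <+: (c :: rest) := List.isPrefixOf_iff_prefix.mp hp
      rcases hpre with ⟨t, ht⟩
      have : c :: rest = ' ' :: '(' :: t := ht.symm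
      rw [this]
      simp
    · simp only [hp, Bool.false_eq_true, if_false] at h ⊢
      have hrest : PySem.Chars.find rest [' ', '('] ≠ -1 := by
        intro hc; rw [if_pos hc] at h; exact h rfl
      rcases ih hrest with ⟨n, hn, hd⟩
      refine ⟨n + 1, ?_, ?_⟩
      · rw [if_neg hrest, hn]; push_cast; ring
      · simpa using hd

lemma pvSplitGo_m0 (fuel : Nat) (l cur : List Char) (acc : List (List Char)) :
    PySem.Chars.splitOnMax.go [' ', '('] fuel 0 l cur acc = ((cur.reverse ++ l) :: acc).reverse := by
  cases fuel with
  | zero => rw [PySem.Chars.splitOnMax.go]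
  | succ fuel =>
    cases l with
    | nil =>
      rw [PySem.Chars.splitOnMax.go]
      · simp
      · omega
    | cons c rest => rw [PySem.Chars.splitOnMax.go]; simp

lemma pvSplitGo_spec (l : List Char) : ∀ (fuel : Nat) (cur : List Char) (acc : List (List Char)),
    l.length < fuel →
    PySem.Chars.splitOnMax.go [' ', '('] fuel 1 l cur acc =
      (if PySem.Chars.find l [' ', '('] = -1 then ((cur.reverse ++ l) :: acc).reverse
       else ((l.drop ((PySem.Chars.find l [' ', '(']).toNat + 2)) ::
             (cur.reverse ++ l.take (PySem.Chars.find l [' ', '(']).toNat) :: acc).reverse) := by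
  induction l with
  | nil =>
    intro fuel cur acc hf
    cases fuel with
    | zero => omega
    | succ fuel =>
      rw [PySem.Chars.splitOnMax.go]
      have : PySem.Chars.find [] [' ', '('] = -1 := by simp [PySem.Chars.find, PySem.Chars.find.go]
      · simp [this]
      · omega
  | cons c rest ih =>
    intro fuel cur acc hf
    cases fuel with
    | zero => omega
    | succ fuel =>
      rw [PySem.Chars.splitOnMax.go]
      simp only [Nat.one_ne_zero, if_false]
      by_cases hp : List.isPrefixOf [' ', '('] (c :: rest)
      · simp only [hp, if_true]
        rw [pvSplitGo_m0]
        have hfind : PySem.Chars.find (c :: rest) [' ', '('] = 0 := by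
          rw [pvFind_cons, if_pos hp]
        rw [hfind]
        simp
      · simp only [hp, Bool.false_eq_true, if_false]
        rw [ih fuel (c :: cur) acc (by simpa using Nat.lt_of_succ_lt_succ hf)]
        have hfind := pvFind_cons c rest
        rw [if_neg (by simp [hp])] at hfind
        by_cases hr : PySem.Chars.find rest [' ', '('] = -1
        · rw [if_pos hr, hfind, if_pos hr, if_pos rfl]
          simp
        · rcases pvFind_spec rest hr with ⟨n, hn, _⟩
          rw [if_neg hr, hfind, if_neg hr]
          have hne : PySem.Chars.find rest [' ', '('] + 1 ≠ -1 := by rw [hn]; omega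
          rw [if_neg hne, hn]
          have h1 : ((n : Int) + 1).toNat = n + 1 := by omega
          have h2 : ((n : Int)).toNat = n := by omega
          rw [h1, h2]
          simp [List.drop_succ_cons, List.take_succ_cons]

lemma pvStrip_paren (t : List Char) :
    PySem.Chars.strip (' ' :: '(' :: (t ++ [')'])) = '(' :: (t ++ [')']) := by
  unfold PySem.Chars.strip PySem.Chars.lstrip PySem.Chars.rstrip
  have h1 : List.dropWhile PySem.Chars.isspace (' ' :: '(' :: (t ++ [')'])) = '(' :: (t ++ [')']) := by
    rw [List.dropWhile_cons]
    simp only [show PySem.Chars.isspace ' ' = true by decide, if_true]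
    rw [List.dropWhile_cons]
    simp [show PySem.Chars.isspace '(' = false by decide]
  rw [h1]
  have h2 : ('(' :: (t ++ [')'])).reverse = ')' :: (t.reverse ++ ['(']) := by simp
  rw [h2, List.dropWhile_cons]
  simp only [show PySem.Chars.isspace ')' = false by decide, Bool.false_eq_true, if_false]
  rw [← h2, List.reverse_reverse]

lemma pvParse_eq (full : String) : pvParseA full = pvParse full := by
  simp only [pvParseA, pvParse]
  set cs := full.toList with hcs
  have hisin : PySem.Str.isIn " (" full = (PySem.Chars.find cs [' ', '('] != -1) := by
    show PySem.Chars.isIn (" (".toList) cs = _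
    rw [pvSep_toList]
    rfl
  have hfind : PySem.Str.find full " (" = PySem.Chars.find cs [' ', '('] := by
    show PySem.Chars.find cs (" (".toList) = _
    rw [pvSep_toList]
  by_cases hend : PySem.Str.endswith full ")" = true
  · by_cases hfound : PySem.Chars.find cs [' ', '('] = -1
    · have hF : (PySem.Chars.find cs [' ', '('] != -1) = false := by simp [hfound]
      rw [hisin, hfind, hF, Bool.false_and, hend]
      simp
    · have hT : (PySem.Chars.find cs [' ', '('] != -1) = true := by simp [hfound]
      rw [hisin, hfind, hT, hend, Bool.and_self, if_pos rfl, if_pos rfl, if_pos rfl]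
      -- decompose via the first occurrence of " ("
      rcases pvFind_spec cs hfound with ⟨n, hn, hd⟩
      have hsfx : [')'] <:+ cs := by
        have h0 : PySem.Chars.endswith cs (")".toList) = true := hend
        rw [show (")".toList) = [')'] by decide] at h0
        exact List.isSuffixOf_iff_suffix.mp h0
      rcases hsfx with ⟨s', hs'⟩
      have hlt : n < cs.length := by
        by_contra hge
        have h0 : List.drop n cs = [] := List.drop_eq_nil_of_le (by omega)
        rw [h0] at hd; cases hd
      have hsplit : PySem.Chars.splitOnMax cs [' ', '('] 1 = [cs.take n, cs.drop (n + 2)] := by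
        unfold PySem.Chars.splitOnMax
        rw [if_neg (by omega)]
        show PySem.Chars.splitOnMax.go [' ', '('] (cs.length + 1) 1 cs [] [] = _
        have h0 := pvSplitGo_spec cs (cs.length + 1) [] [] (by omega)
        rw [h0, if_neg hfound, hn]
        simp
      have hbase : ((PySem.Str.splitMax? full " (" 1).getD []).headD "" = String.ofList (cs.take n) := by
        unfold PySem.Str.splitMax?
        rw [pvSep_toList]
        unfold PySem.Chars.splitMax?
        rw [if_neg (by decide)]
        rw [← hcs, hsplit]
        simp
      rw [hbase, hn]
      have hlen : PySem.Str.len (String.ofList (cs.take n)) = (n : Int) := by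
        unfold PySem.Str.len
        rw [String.toList_ofList, List.length_take_of_le (by omega)]
      rw [hlen]
      have htail : ∃ t, List.drop (n + 2) cs = t ++ [')'] := by
        rcases List.eq_nil_or_concat (List.drop (n + 2) cs) with hnil | ⟨t, c, htc⟩
        · exfalso
          have hcs2 : cs = cs.take n ++ (' ' :: '(' :: List.drop (n + 2) cs) := by
            rw [← hd, List.take_append_drop]
          rw [hnil] at hcs2
          have h1 : cs.getLast? = some ')' := by rw [← hs']; simp [List.getLast?_append]
          have h2 : cs.getLast? = some '(' := by
            rw [hcs2]
            have h3 : (cs.take n ++ [' ', '(']).getLast? = some '(' := by simp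
            simpa using h3
          rw [h1] at h2; cases h2
        · refine ⟨t, ?_⟩
          have h1 : cs.getLast? = some ')' := by rw [← hs']; simp [List.getLast?_append]
          have hcs2 : cs = cs.take n ++ (' ' :: '(' :: List.drop (n + 2) cs) := by
            rw [← hd, List.take_append_drop]
          have h2 : cs.getLast? = some c := by
            rw [hcs2, htc]
            rw [List.concat_eq_append, List.getLast?_append,
              show (' ' :: '(' :: (t ++ [c])) = ((' ' :: '(' :: t) ++ [c]) from rfl,
              List.getLast?_concat]
            simp
          rw [h1] at h2
          injection h2 with h2
          rw [htc, h2, List.concat_eq_append]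
      rcases htail with ⟨t, ht⟩
      have hsliceA : PySem.Str.slice full (some (n : Int)) none = String.ofList (List.drop n cs) := by
        unfold PySem.Str.slice
        rw [← hcs]
        show String.ofList (PySem.List.slice cs (some (n : Int)) none) = _
        rw [PySem.List.slice_from cs (by omega : (0:Int) ≤ (n : Int))]
        simp
      rw [hsliceA]
      have hstrip : PySem.Str.strip (String.ofList (List.drop n cs))
          = String.ofList ('(' :: List.drop (n + 2) cs) := by
        unfold PySem.Str.strip
        rw [String.toList_ofList, hd, ht, pvStrip_paren, ← ht]
      rw [hstrip]
      have hsliceB1 : PySem.Str.slice full none (some (n : Int)) = String.ofList (cs.take n) := by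
        unfold PySem.Str.slice
        rw [← hcs]
        show String.ofList (PySem.List.slice cs none (some (n : Int))) = _
        rw [PySem.List.slice_to cs (by omega : (0:Int) ≤ (n : Int))]
        simp
      have hsliceB2 : PySem.Str.slice full (some ((n : Int) + 1)) none
          = String.ofList ('(' :: List.drop (n + 2) cs) := by
        unfold PySem.Str.slice
        rw [← hcs]
        show String.ofList (PySem.List.slice cs (some ((n : Int) + 1)) none) = _
        rw [PySem.List.slice_from cs (by omega : (0:Int) ≤ (n : Int) + 1)]
        have h1 : ((n : Int) + 1).toNat = n + 1 := by omega
        rw [h1]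
        have h2 : List.drop (n + 1) cs = '(' :: List.drop (n + 2) cs := by
          have h3 := congrArg (List.drop 1) hd
          rw [List.drop_drop] at h3
          simpa [Nat.add_comm] using h3
        rw [h2]
      rw [hsliceB1, hsliceB2]
  · have hend' : PySem.Str.endswith full ")" = false := by simpa using hend
    rw [hend', hisin, Bool.and_false]
    simp

-- ===== VERDICT (by name: the statement is the Claim_ definition above) =====
lemma pvDedup_pair_fold' (vs : List String) :
    (vs.foldl (fun (us : List String × PySem.Set String) v =>
        if PySem.Set.contains us.2 v then us else (us.1 ++ [v], PySem.Set.add us.2 v))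
      ([], PySem.Set.empty)).1 = PySem.Set.ofList vs := by
  rw [show (([], PySem.Set.empty) : List String × PySem.Set String)
      = (([] : List String), ([] : List String)) from rfl, pvDedup_pair_fold]
  rfl

theorem group_voice_variants_spec : Claim_equal_group_voice_variants := by
  intro names _
  show group_voice_variants names = group_voice_variants_alt names
  simp only [group_voice_variants, group_voice_variants_alt, pvParse_eq, List.foldl_map]
  set L := names.map pvParse with hL
  set G := List.foldl (fun d full => PySem.Dict.modify d (pvParse full).1 [] fun l => l ++ [(pvParse full).2]) PySem.Dict.empty names with hG
  set G0 := List.foldl (fun x y => PySem.Dict.insert x (pvParse y).1 []) PySem.Dict.empty names with hG0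
  have hGdef : G = List.foldl (fun d p => PySem.Dict.modify d p.1 [] fun l => l ++ [p.2]) PySem.Dict.empty L := by
    rw [hG, hL, List.foldl_map]
  have hG0def : G0 = List.foldl (fun x p => PySem.Dict.insert x p.1 ([] : List String)) PySem.Dict.empty L := by
    rw [hG0, hL, List.foldl_map]
  set SRT := PySem.List.sorted2 L (fun p => pvKey1 p.2) (fun p => pvKey2 p.2) with hSRT
  -- keys and values of the two seed dicts
  have hkeysG : G.keys = PySem.Set.ofList (L.map Prod.fst) := by
    rw [hGdef, PySem.Dict.keys_foldl_modify_key L Prod.fst [] (fun _ p => (fun l => l ++ [p.2])) PySem.Dict.empty,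
      PySem.Dict.keys_empty]
    rfl
  have hnodG : G.keys.Nodup := by
    rw [hGdef]
    exact PySem.Dict.nodup_keys_foldl_modify_key L Prod.fst [] _ _ PySem.Dict.nodup_keys_empty
  have hgetG : ∀ b, G.getD b [] = (L.filter (fun p => p.1 == b)).map (fun p => p.2) := by
    intro b
    rw [hGdef, PySem.Dict.getD_foldl_modify_append, PySem.Dict.getD_empty]
    rfl
  have hkeysG0 : G0.keys = PySem.Set.ofList (L.map Prod.fst) := by
    rw [hG0def, PySem.Dict.keys_foldl_insert_key L Prod.fst (fun _ _ => []) PySem.Dict.empty,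
      PySem.Dict.keys_empty]
    rfl
  have hnodG0 : G0.keys.Nodup := by
    rw [hG0def]
    exact PySem.Dict.nodup_keys_foldl_insert_key L Prod.fst _ _ PySem.Dict.nodup_keys_empty
  have hgetG0 : ∀ b, G0.getD b [] = [] := by
    intro b
    rw [hG0def]
    exact pvGetD_seed_fold L PySem.Dict.empty b (PySem.Dict.getD_empty b [])
  -- final dicts
  have hmemSRT : ∀ p ∈ SRT, p ∈ L := by
    intro p hp
    exact (PySem.List.sorted2_perm L _ _ false).subset ((hSRT ▸ hp))
  have hkeysB : (List.foldl (fun d p => if (d.getD p.1 []).contains p.2 = true then d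
      else d.modify p.1 [] fun l => l ++ [p.2]) G0 SRT).keys = G0.keys := by
    apply pvKeys_dedup_fold
    intro p hp
    rw [PySem.Dict.contains_iff_mem_keys, hkeysG0, PySem.Set.mem_ofList]
    exact List.mem_map.mpr ⟨p, hmemSRT p hp, rfl⟩
  have hnodB : (List.foldl (fun d p => if (d.getD p.1 []).contains p.2 = true then d
      else d.modify p.1 [] fun l => l ++ [p.2]) G0 SRT).keys.Nodup := by
    rw [hkeysB]; exact hnodG0
  have hkeysA : (List.foldl (fun d p => d.insert p.1
      (PySem.List.sorted2 (List.foldl (fun us v => if PySem.Set.contains us.2 v = true then us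
        else (us.1 ++ [v], PySem.Set.add us.2 v)) ([], PySem.Set.empty) p.2).1 pvKey1 pvKey2)) G G.items).keys
      = G.keys := by
    rw [PySem.Dict.keys_foldl_insert_key G.items Prod.fst _ G]
    have : G.items.map Prod.fst = G.keys := rfl
    rw [this]
    exact pvUpdate_eq_self _ _ (fun y hy => hy)
  have hnodA : (List.foldl (fun d p => d.insert p.1
      (PySem.List.sorted2 (List.foldl (fun us v => if PySem.Set.contains us.2 v = true then us
        else (us.1 ++ [v], PySem.Set.add us.2 v)) ([], PySem.Set.empty) p.2).1 pvKey1 pvKey2)) G G.items).keys.Nodup := by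
    rw [hkeysA]; exact hnodG
  rw [PySem.Dict.items_eq_map_keys _ hnodA [], PySem.Dict.items_eq_map_keys _ hnodB [],
    hkeysA, hkeysB, hkeysG, hkeysG0]
  apply List.map_congr_left
  intro b hb
  have hbk : b ∈ G.keys := by rw [hkeysG]; exact hb
  have hmemItems : (b, G.getD b []) ∈ G.items := by
    rw [PySem.Dict.items_eq_map_keys G hnodG []]
    exact List.mem_map.mpr ⟨b, hbk, rfl⟩
  -- A's value at b
  have hvalA : (List.foldl (fun d p => d.insert p.1
      (PySem.List.sorted2 (List.foldl (fun us v => if PySem.Set.contains us.2 v = true then us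
        else (us.1 ++ [v], PySem.Set.add us.2 v)) ([], PySem.Set.empty) p.2).1 pvKey1 pvKey2)) G G.items).getD b []
      = PySem.List.sorted2 (PySem.Set.ofList (G.getD b [])) pvKey1 pvKey2 := by
    have h0 := pvGetD_insert_fold (fun p =>
      PySem.List.sorted2 (List.foldl (fun us v => if PySem.Set.contains us.2 v = true then us
        else (us.1 ++ [v], PySem.Set.add us.2 v)) ([], PySem.Set.empty) p.2).1 pvKey1 pvKey2)
      G.items G (b, G.getD b []) hmemItems hnodG
    rw [h0]
    beta_reduce
    rw [pvDedup_pair_fold']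
  -- B's value at b
  have hvalB : (List.foldl (fun d p => if (d.getD p.1 []).contains p.2 = true then d
      else d.modify p.1 [] fun l => l ++ [p.2]) G0 SRT).getD b []
      = PySem.Set.ofList ((SRT.filter (fun p => p.1 == b)).map (fun p => p.2)) := by
    rw [pvGetD_dedup_fold SRT G0 b, hgetG0 b]
    rfl
  rw [hvalA, hvalB]
  -- the sort/dedup chain
  have hbridgeP : SRT = PySem.List.sorted L (fun p => toLex (pvKey1 p.2, pvKey2 p.2)) false := by
    rw [hSRT, pvSorted2_eq]
  have hchain : ((SRT.filter (fun p => p.1 == b)).map (fun p => p.2))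
      = PySem.List.sorted ((L.filter (fun p => p.1 == b)).map (fun p => p.2))
          (fun v => toLex (pvKey1 v, pvKey2 v)) false := by
    rw [hbridgeP, pvSorted_filter, ← pvSorted_map (fun v => toLex (pvKey1 v, pvKey2 v)) (fun p : String × String => p.2)]
  rw [hchain, pvOfList_sorted, hgetG b, pvSorted2_eq]
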